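-- pv_equiv track=rewrite | github.com/yasakei/neutron | benchmarks/python/regex.py | match_phone
-- ===== SOURCE A (Python) =====
-- def match_phone(text):
--     count = 0
--     i = 0
--     while i < len(text) - 11:
--         if text[i + 3] == "-" and text[i + 7] == "-":
--             count += 1
--             i += 12
--         else:
--             i += 1
--     return count
-- ===== SOURCE B (Python) =====
-- def match_phone(text):
--     n = len(text)
--     dashes = [i for i, c in enumerate(text) if c == '-']
--     dash_set = set(dashes)
--     count = 0
--     next_free = 0
--     for d in dashes:
--         if d - 3 >= next_free and d - 3 + 12 <= n and d + 4 in dash_set: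
--             count += 1
--             next_free = d - 3 + 12
--     return count
-- ===== Notes on version B (the rewrite author's own statement) =====
-- stated objective: alternative
-- what changed: Instead of walking every index with a stride-1/stride-12 while loop, B first extracts the list of dash positions (one comprehension), then makes one greedy pass over dash positions only, counting starts d-3 that fit after the previous match (set lookup for the companion dash at d+4); the per-index Python loop disappears.
import Mathlib
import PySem

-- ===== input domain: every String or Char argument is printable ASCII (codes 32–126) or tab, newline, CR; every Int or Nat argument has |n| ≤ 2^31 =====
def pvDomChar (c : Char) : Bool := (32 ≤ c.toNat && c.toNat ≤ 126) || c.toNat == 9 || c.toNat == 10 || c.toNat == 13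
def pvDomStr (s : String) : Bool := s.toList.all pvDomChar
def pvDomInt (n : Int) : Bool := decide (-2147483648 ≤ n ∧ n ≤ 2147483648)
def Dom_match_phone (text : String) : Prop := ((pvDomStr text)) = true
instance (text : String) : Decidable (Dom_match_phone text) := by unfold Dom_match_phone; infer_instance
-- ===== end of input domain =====

-- B extracts the dash positions first and then counts matches by one greedy pass over
-- dash positions only (set lookup for the companion dash); same result, different structure.

-- ===== PORT A =====
-- literal port of A's while loop: integer index i, accumulator count
def matchPhoneGoA (cs : List Char) (count i : Int) : Int :=
  if _h : i < (cs.length : Int) - 11 then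
    if PySem.List.pyGet? cs (i + 3) = some '-' ∧ PySem.List.pyGet? cs (i + 7) = some '-' then
      matchPhoneGoA cs (count + 1) (i + 12)
    else
      matchPhoneGoA cs count (i + 1)
  else
    count
termination_by ((cs.length : Int) - i).toNat
decreasing_by all_goals omega

def match_phone (text : String) : Int := matchPhoneGoA text.toList 0 0

-- ===== PORT B =====
-- [i for i, c in enumerate(text) if c == '-']
def dashPositions (cs : List Char) : List Int :=
  (PySem.List.enumerate cs).filterMap (fun p => if p.2 = '-' then some p.1 else none)

-- the for-loop over dashes with state (count, next_free)
def match_phone_alt (text : String) : Int :=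
  let cs := text.toList
  let n : Int := (cs.length : Int)
  let dashes := dashPositions cs
  let dashSet : PySem.Set Int := PySem.Set.ofList dashes
  (dashes.foldl
    (fun (st : Int × Int) d =>
      if d - 3 ≥ st.2 ∧ d - 3 + 12 ≤ n ∧ PySem.Set.contains dashSet (d + 4) = true then
        (st.1 + 1, d - 3 + 12)
      else st)
    (0, 0)).1

-- ===== PRECONDITION & SPEC =====
def Spec_match_phone (text : String) (out : Int) : Prop := out = match_phone_alt text
instance (text : String) (out : Int) : Decidable (Spec_match_phone text out) := by unfold Spec_match_phone; infer_instance

-- ===== CLAIM (what is proved, stated in full; the proofs are below) =====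
def Claim_equal_match_phone : Prop := ∀ (text : String), Dom_match_phone text → Spec_match_phone text (match_phone text)

-- ===== LEMMAS AND PROOFS =====

-- i is a match start for A's test
def pvCand (cs : List Char) (i : Int) : Prop :=
  0 ≤ i ∧ i + 12 ≤ (cs.length : Int) ∧ cs[(i + 3).toNat]? = some '-' ∧ cs[(i + 7).toNat]? = some '-'

theorem mem_dashPositions {cs : List Char} {d : Int} :
    d ∈ dashPositions cs ↔ 0 ≤ d ∧ cs[d.toNat]? = some '-' := by
  simp only [dashPositions, List.mem_filterMap, PySem.List.mem_enumerate_iff]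
  constructor
  · rintro ⟨p, ⟨k, hk, rfl⟩, hf⟩
    simp only [zero_add] at hf
    split at hf
    · rename_i hdash
      cases hf
      refine ⟨Int.natCast_nonneg _, ?_⟩
      simp [Int.toNat_natCast, List.getElem?_eq_getElem hk, hdash]
    · cases hf
  · rintro ⟨hd, hget⟩
    have hk : d.toNat < cs.length := (List.getElem?_eq_some_iff.mp hget).1
    refine ⟨(d.toNat, cs[d.toNat]), ⟨d.toNat, hk, by simp⟩, ?_⟩
    have : cs[d.toNat] = '-' := by
      have := (List.getElem?_eq_some_iff.mp hget).2; simpa using this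
    simp [this, Int.toNat_of_nonneg hd]

theorem pairwise_dashPositions (cs : List Char) : (dashPositions cs).Pairwise (· < ·) := by
  have h := PySem.List.pairwise_lt_enumerate (xs := cs) (s := 0)
  unfold dashPositions
  refine List.Pairwise.filterMap _ ?_ h
  intro p q hpq a ha b hb
  split at ha <;> cases ha
  split at hb <;> cases hb
  exact hpq

-- A's loop, when there is no match start ≥ nf, just runs off the end
theorem goA_no_cand (cs : List Char) (count nf : Int) (hnf : 0 ≤ nf)
    (h : ∀ j, pvCand cs j → ¬ nf ≤ j) : matchPhoneGoA cs count nf = count := by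
  rw [matchPhoneGoA]
  split
  · rename_i hg
    have hnc : ¬ (PySem.List.pyGet? cs (nf + 3) = some '-' ∧ PySem.List.pyGet? cs (nf + 7) = some '-') := by
      rintro ⟨h3, h7⟩
      rw [PySem.List.pyGet?_of_nonneg (xs := cs) (i := nf + 3) (by omega)] at h3
      rw [PySem.List.pyGet?_of_nonneg (xs := cs) (i := nf + 7) (by omega)] at h7
      exact h nf ⟨hnf, by omega, h3, h7⟩ le_rfl
    rw [if_neg hnc]
    exact goA_no_cand cs count (nf + 1) (by omega) (fun j hj hle => h j hj (by omega))
  · rfl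
termination_by ((cs.length : Int) - nf).toNat
decreasing_by omega

-- A's loop, from nf up to the least match start c ≥ nf, counts once and jumps to c+12
theorem goA_least (cs : List Char) (count nf c : Int) (hc : pvCand cs c) (hnf : 0 ≤ nf)
    (hle : nf ≤ c) (hmin : ∀ j, pvCand cs j → nf ≤ j → c ≤ j) :
    matchPhoneGoA cs count nf = matchPhoneGoA cs (count + 1) (c + 12) := by
  obtain ⟨hc0, hclen, hc3, hc7⟩ := hc
  rw [matchPhoneGoA]
  have hg : nf < (cs.length : Int) - 11 := by omega
  rw [dif_pos hg]
  by_cases heq : nf = c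
  · subst heq
    rw [if_pos ⟨by rw [PySem.List.pyGet?_of_nonneg (xs := cs) (i := nf + 3) (by omega)]; exact hc3,
                by rw [PySem.List.pyGet?_of_nonneg (xs := cs) (i := nf + 7) (by omega)]; exact hc7⟩]
  · have hlt : nf < c := lt_of_le_of_ne hle heq
    have hnc : ¬ (PySem.List.pyGet? cs (nf + 3) = some '-' ∧ PySem.List.pyGet? cs (nf + 7) = some '-') := by
      rintro ⟨h3, h7⟩
      rw [PySem.List.pyGet?_of_nonneg (xs := cs) (i := nf + 3) (by omega)] at h3
      rw [PySem.List.pyGet?_of_nonneg (xs := cs) (i := nf + 7) (by omega)] at h7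
      have := hmin nf ⟨hnf, by omega, h3, h7⟩ le_rfl
      omega
    rw [if_neg hnc]
    exact goA_least cs count (nf + 1) c ⟨hc0, hclen, hc3, hc7⟩ (by omega) (by omega)
      (fun j hj hle' => hmin j hj (by omega))
termination_by (c - nf).toNat
decreasing_by omega

-- B's greedy fold over a suffix D of the dash list equals A's loop resumed at next_free nf
theorem foldB_eq_goA (cs : List Char) (D : List Int) (count nf : Int) (hnf : 0 ≤ nf)
    (hD : ∀ d ∈ D, 0 ≤ d ∧ cs[d.toNat]? = some '-')
    (hsorted : D.Pairwise (· < ·))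
    (hall : ∀ j, pvCand cs j → nf ≤ j → (j + 3) ∈ D) :
    (D.foldl
      (fun (st : Int × Int) d =>
        if d - 3 ≥ st.2 ∧ d - 3 + 12 ≤ (cs.length : Int) ∧
            PySem.Set.contains (PySem.Set.ofList (dashPositions cs)) (d + 4) = true then
          (st.1 + 1, d - 3 + 12)
        else st)
      (count, nf)).1 = matchPhoneGoA cs count nf := by
  induction D generalizing count nf with
  | nil =>
    simp only [List.foldl_nil]
    exact (goA_no_cand cs count nf hnf (fun j hj hle => by
      have := hall j hj hle; simp at this)).symm
  | cons d D' ih =>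
    obtain ⟨hd0, hddash⟩ := hD d (List.mem_cons_self ..)
    have hD' : ∀ e ∈ D', 0 ≤ e ∧ cs[e.toNat]? = some '-' :=
      fun e he => hD e (List.mem_cons_of_mem _ he)
    have hgt : ∀ e ∈ D', d < e := fun e he => (List.pairwise_cons.mp hsorted).1 e he
    have hsorted' := (List.pairwise_cons.mp hsorted).2
    simp only [List.foldl_cons]
    by_cases hcond : d - 3 ≥ nf ∧ d - 3 + 12 ≤ (cs.length : Int) ∧
        PySem.Set.contains (PySem.Set.ofList (dashPositions cs)) (d + 4) = true
    · obtain ⟨hge, hbound, hmem⟩ := hcond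
      have hmem' : (d + 4) ∈ dashPositions cs := by
        rw [PySem.Set.contains_iff] at hmem
        exact (PySem.Set.mem_ofList _ _).mp hmem
      obtain ⟨_, hd4⟩ := mem_dashPositions.mp hmem'
      have hcand : pvCand cs (d - 3) := by
        refine ⟨by omega, by omega, ?_, ?_⟩
        · have : (d - 3 + 3) = d := by ring
          rw [this]; exact hddash
        · have : (d - 3 + 7).toNat = (d + 4).toNat := by omega
          rw [this]; exact hd4
      have hminimal : ∀ j, pvCand cs j → nf ≤ j → d - 3 ≤ j := by
        intro j hj hle
        rcases List.mem_cons.mp (hall j hj hle) with h | h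
        · omega
        · have := hgt _ h; omega
      rw [if_pos ⟨hge, hbound, hmem⟩]
      rw [ih (count + 1) (d - 3 + 12) (by omega) hD' hsorted'
        (fun j hj hle => by
          rcases List.mem_cons.mp (hall j hj (by omega)) with h | h
          · omega
          · exact h)]
      exact (goA_least cs count nf (d - 3) hcand hnf (by omega) hminimal).symm
    · rw [if_neg hcond]
      refine ih count nf hnf hD' hsorted' (fun j hj hle => ?_)
      rcases List.mem_cons.mp (hall j hj hle) with h | h
      · exfalso
        obtain ⟨hj0, hjlen, hj3, hj7⟩ := hj
        apply hcond
        refine ⟨by omega, by omega, ?_⟩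
        rw [PySem.Set.contains_iff, PySem.Set.mem_ofList, mem_dashPositions]
        refine ⟨by omega, ?_⟩
        have : (d + 4).toNat = (j + 7).toNat := by omega
        rw [this]; exact hj7
      · exact h

-- ===== VERDICT (by name: the statement is the Claim_ definition above) =====
theorem match_phone_spec : Claim_equal_match_phone := by
  intro text _
  unfold Spec_match_phone match_phone match_phone_alt
  refine (foldB_eq_goA text.toList (dashPositions text.toList) 0 0 le_rfl
    (fun d hd => mem_dashPositions.mp hd)
    (pairwise_dashPositions text.toList)
    (fun j hj hle => ?_)).symm
  obtain ⟨hj0, hjlen, hj3, hj7⟩ := hj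
  exact mem_dashPositions.mpr ⟨by omega, hj3⟩
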